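-- pv_equiv track=rewrite | github.com/cpsiff/CA-for-education | rules.py | seeds
-- ===== SOURCE A (Python) =====
-- def seeds(grid, next_grid):
--     for i in range(1, len(grid) - 1):
--         for j in range(1, len(grid) - 1):
--             if grid[i][j] == 0:
--                 neighbors = [grid[i - 1][j], grid[i + 1][j], grid[i][j - 1], grid[i][j + 1],
--                              grid[i - 1][j + 1], grid[i - 1][j - 1], grid[i + 1][j + 1],
--                              grid[i + 1][j - 1]]
--                 if sum(neighbors) == 2:
--                     next_grid[i][j] = 1
--     return next_grid
-- ===== SOURCE B (Python) =====
-- def seeds(grid, next_grid):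
--     # Scatter pass: every cell adds its value into an accumulator at its 8
--     # neighbor positions that fall in the interior; then one pass writes the 1s.
--     # Mutates next_grid in place (like A) and returns it.
--     n = len(grid)
--     if n < 3:
--         return next_grid
--     acc = [[0] * n for _ in range(n)]
--     for p in range(n):
--         for q in range(n):
--             v = grid[p][q]
--             if v != 0:
--                 for dp in (-1, 0, 1):
--                     for dq in (-1, 0, 1):
--                         if dp != 0 or dq != 0:
--                             r = p + dp
--                             c = q + dq
--                             if 1 <= r <= n - 2 and 1 <= c <= n - 2:
--                                 acc[r][c] += v
--     for i in range(1, n - 1):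
--         for j in range(1, n - 1):
--             if grid[i][j] == 0 and acc[i][j] == 2:
--                 next_grid[i][j] = 1
--     return next_grid
-- ===== Notes on version B (the rewrite author's own statement) =====
-- stated objective: alternative
-- what changed: Instead of gathering the 8 neighbor values for every interior zero cell, B scatters: each nonzero cell adds its value into a zero-initialized accumulator grid at its 8 interior neighbor positions, and a final pass writes 1 wherever the cell is 0 and the accumulated neighbor sum is 2.
-- outside the precondition, e.g. on seeds([[0, 0], [0, 1, 0], [0, 0, 0]], []): A returns [], B raises IndexError
import Mathlib
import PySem

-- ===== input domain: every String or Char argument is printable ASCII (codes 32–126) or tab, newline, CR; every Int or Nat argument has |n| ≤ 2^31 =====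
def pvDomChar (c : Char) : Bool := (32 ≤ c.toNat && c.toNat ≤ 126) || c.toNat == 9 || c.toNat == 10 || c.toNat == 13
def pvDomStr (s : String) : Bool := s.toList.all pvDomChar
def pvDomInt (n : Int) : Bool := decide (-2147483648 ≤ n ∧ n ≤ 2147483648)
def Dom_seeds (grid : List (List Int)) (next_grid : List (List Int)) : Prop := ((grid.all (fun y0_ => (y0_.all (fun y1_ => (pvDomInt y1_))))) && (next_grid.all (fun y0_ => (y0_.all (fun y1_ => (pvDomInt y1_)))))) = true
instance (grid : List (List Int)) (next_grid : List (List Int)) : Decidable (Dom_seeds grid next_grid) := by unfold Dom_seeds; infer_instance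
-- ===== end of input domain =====

-- B replaces A's per-cell gather of the 8 neighbor values by a scatter pass into an
-- accumulator grid plus one write pass (alternative decomposition, same asymptotic cost).
-- Both Pythons mutate next_grid in place; the equivalence proved here is about the return value.

-- ===== PORT A =====
-- next_grid[i][j] = v  (exact for the nonnegative in-range indices admitted by Pre_seeds)
def setCell (ng : List (List Int)) (i j v : Int) : List (List Int) :=
  PySem.List.pySetD ng i (PySem.List.pySetD (PySem.List.pyGetD ng i []) j v)

def seeds (grid : List (List Int)) (next_grid : List (List Int)) : List (List Int) :=
  (PySem.List.pyRange 1 ((grid.length : Int) - 1) 1).foldl (fun ng i =>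
    (PySem.List.pyRange 1 ((grid.length : Int) - 1) 1).foldl (fun ng j =>
      if PySem.List.pyGetD (PySem.List.pyGetD grid i []) j 0 = 0 then
        let neighbors : List Int :=
          [PySem.List.pyGetD (PySem.List.pyGetD grid (i - 1) []) j 0,
           PySem.List.pyGetD (PySem.List.pyGetD grid (i + 1) []) j 0,
           PySem.List.pyGetD (PySem.List.pyGetD grid i []) (j - 1) 0,
           PySem.List.pyGetD (PySem.List.pyGetD grid i []) (j + 1) 0,
           PySem.List.pyGetD (PySem.List.pyGetD grid (i - 1) []) (j + 1) 0,
           PySem.List.pyGetD (PySem.List.pyGetD grid (i - 1) []) (j - 1) 0,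
           PySem.List.pyGetD (PySem.List.pyGetD grid (i + 1) []) (j + 1) 0,
           PySem.List.pyGetD (PySem.List.pyGetD grid (i + 1) []) (j - 1) 0]
        if neighbors.sum = 2 then setCell ng i j 1 else ng
      else ng) ng) next_grid

-- ===== PORT B =====
-- acc[r][c] += v  (indices produced by B are always in range)
def addAt (acc : List (List Int)) (r c v : Int) : List (List Int) :=
  PySem.List.pySetD acc r
    (PySem.List.pySetD (PySem.List.pyGetD acc r []) c
      (PySem.List.pyGetD (PySem.List.pyGetD acc r []) c 0 + v))

def seeds_alt (grid : List (List Int)) (next_grid : List (List Int)) : List (List Int) :=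
  let n : Int := grid.length
  if n < 3 then next_grid else
  let acc0 : List (List Int) := List.replicate grid.length (List.replicate grid.length (0 : Int))
  let acc :=
    (PySem.List.pyRange 0 n 1).foldl (fun acc p =>
      (PySem.List.pyRange 0 n 1).foldl (fun acc q =>
        let v := PySem.List.pyGetD (PySem.List.pyGetD grid p []) q 0
        if v ≠ 0 then
          ([-1, 0, 1] : List Int).foldl (fun acc dp =>
            ([-1, 0, 1] : List Int).foldl (fun acc dq =>
              if dp ≠ 0 ∨ dq ≠ 0 then
                if 1 ≤ p + dp ∧ p + dp ≤ n - 2 ∧ 1 ≤ q + dq ∧ q + dq ≤ n - 2 then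
                  addAt acc (p + dp) (q + dq) v
                else acc
              else acc) acc) acc
        else acc) acc) acc0
  (PySem.List.pyRange 1 (n - 1) 1).foldl (fun ng i =>
    (PySem.List.pyRange 1 (n - 1) 1).foldl (fun ng j =>
      if PySem.List.pyGetD (PySem.List.pyGetD grid i []) j 0 = 0 ∧
         PySem.List.pyGetD (PySem.List.pyGetD acc i []) j 0 = 2 then
        setCell ng i j 1
      else ng) ng) next_grid

-- ===== PRECONDITION & SPEC =====
-- Pre_ excludes inputs where A's reads/writes go out of range (IndexError); it also excludes
-- some inputs A still returns on (short rows that are never actually indexed because no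
-- interior cell is 0 / no write fires) — see the cites in claim.json.
def Pre_seeds (grid : List (List Int)) (next_grid : List (List Int)) : Prop :=
  3 ≤ grid.length →
    ((∀ r ∈ grid, grid.length ≤ r.length) ∧
     grid.length - 1 ≤ next_grid.length ∧
     ∀ r ∈ next_grid, grid.length - 1 ≤ r.length)

instance (grid : List (List Int)) (next_grid : List (List Int)) : Decidable (Pre_seeds grid next_grid) := by
  unfold Pre_seeds; infer_instance

def pvWitness_seeds : List (List Int) × List (List Int) :=
  ([[0, 0, 0], [1, 0, 1], [0, 0, 0]], [[0, 0, 0], [0, 0, 0], [0, 0, 0]])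

def Spec_seeds (grid : List (List Int)) (next_grid : List (List Int)) (out : List (List Int)) : Prop := out = seeds_alt grid next_grid
instance (grid : List (List Int)) (next_grid : List (List Int)) (out : List (List Int)) : Decidable (Spec_seeds grid next_grid out) := by unfold Spec_seeds; infer_instance

-- ===== CLAIM (what is proved, stated in full; the proofs are below) =====
def Claim_equal_seeds : Prop := ∀ (grid : List (List Int)) (next_grid : List (List Int)), Dom_seeds grid next_grid → Pre_seeds grid next_grid → Spec_seeds grid next_grid (seeds grid next_grid)

-- ===== LEMMAS AND PROOFS =====
def gg (m : List (List Int)) (i j : Int) : Int :=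
  PySem.List.pyGetD (PySem.List.pyGetD m i []) j 0

def Shp (n : Nat) (m : List (List Int)) : Prop :=
  m.length = n ∧ ∀ r ∈ m, r.length = n

theorem addAt_spec (n : Nat) (acc : List (List Int)) (h : Shp n acc) (r c v i j : Int)
    (hr0 : 0 ≤ r) (hrn : r < (n : Int)) (hc0 : 0 ≤ c) (hcn : c < (n : Int))
    (hi0 : 0 ≤ i) (hin : i < (n : Int)) (hj0 : 0 ≤ j) (hjn : j < (n : Int)) :
    Shp n (addAt acc r c v) ∧
      gg (addAt acc r c v) i j = gg acc i j + (if r = i ∧ c = j then v else 0) := by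
  obtain ⟨hl, hrow⟩ := h
  have hrl : r.toNat < acc.length := by omega
  have hil : i.toNat < acc.length := by omega
  have hrowlen : (acc[r.toNat]).length = n := hrow _ (List.getElem_mem hrl)
  have hrowlen' : (acc[i.toNat]).length = n := hrow _ (List.getElem_mem hil)
  have hget_r : PySem.List.pyGetD acc r [] = acc[r.toNat] :=
    PySem.List.pyGetD_eq_getElem acc [] hr0 (by omega)
  have hget_c : PySem.List.pyGetD acc[r.toNat] c 0 = acc[r.toNat][c.toNat] :=
    PySem.List.pyGetD_eq_getElem _ 0 hc0 (by omega)
  have hX : addAt acc r c v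
      = acc.set r.toNat ((acc[r.toNat]).set c.toNat (acc[r.toNat][c.toNat] + v)) := by
    unfold addAt
    rw [hget_r, hget_c, PySem.List.pySetD_of_nonneg _ _ hc0, PySem.List.pySetD_of_nonneg _ _ hr0]
  constructor
  · rw [hX]
    refine ⟨by simpa using hl, ?_⟩
    intro row hm
    rcases List.mem_or_eq_of_mem_set hm with hm | rfl
    · exact hrow _ hm
    · simpa using hrowlen
  · rw [hX]
    unfold gg
    have hlen_set : (acc.set r.toNat ((acc[r.toNat]).set c.toNat (acc[r.toNat][c.toNat] + v))).length = acc.length := by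
      simp
    rw [PySem.List.pyGetD_eq_getElem _ [] hi0 (by omega)]
    rw [List.getElem_set]
    rw [PySem.List.pyGetD_eq_getElem _ [] hi0 (by omega)]
    by_cases hri : r.toNat = i.toNat
    · have hri' : r = i := by omega
      rw [if_pos hri]
      subst hri'
      rw [PySem.List.pyGetD_eq_getElem _ 0 hj0 (by simp [hrowlen]; omega)]
      rw [List.getElem_set]
      rw [PySem.List.pyGetD_eq_getElem _ 0 hj0 (by omega)]
      by_cases hcj : c.toNat = j.toNat
      · have : c = j := by omega
        subst this
        simp
      · have : ¬ c = j := by omega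
        rw [if_neg hcj, if_neg (by rintro ⟨-, h2⟩; exact this h2), add_zero]
    · have hri' : ¬ r = i := by omega
      rw [if_neg hri]
      simp [hri']
-- guarded scatter-add: effect on an interior target cell (i, j)
theorem guardAdd_spec (n : Nat) (acc : List (List Int)) (h : Shp n acc) (r c v i j : Int)
    (hi1 : 1 ≤ i) (hin : i ≤ (n : Int) - 2) (hj1 : 1 ≤ j) (hjn : j ≤ (n : Int) - 2) :
    Shp n (if 1 ≤ r ∧ r ≤ (n : Int) - 2 ∧ 1 ≤ c ∧ c ≤ (n : Int) - 2 then addAt acc r c v else acc) ∧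
      gg (if 1 ≤ r ∧ r ≤ (n : Int) - 2 ∧ 1 ≤ c ∧ c ≤ (n : Int) - 2 then addAt acc r c v else acc) i j
        = gg acc i j + (if r = i ∧ c = j then v else 0) := by
  by_cases hb : 1 ≤ r ∧ r ≤ (n : Int) - 2 ∧ 1 ≤ c ∧ c ≤ (n : Int) - 2
  · rw [if_pos hb]
    exact addAt_spec n acc h r c v i j (by omega) (by omega) (by omega) (by omega)
      (by omega) (by omega) (by omega) (by omega)
  · rw [if_neg hb]
    refine ⟨h, ?_⟩
    have : ¬ (r = i ∧ c = j) := by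
      rintro ⟨rfl, rfl⟩; exact hb ⟨hi1, hin, hj1, hjn⟩
    simp [this]

-- generic scatter-fold lemma: shape is preserved and the target cell accumulates a per-element delta
theorem foldl_gg {α : Type} (n : Nat) (i j : Int) (f : List (List Int) → α → List (List Int)) (d : α → Int) :
    ∀ (L : List α) (acc : List (List Int)), Shp n acc →
      (∀ a x, x ∈ L → Shp n a → Shp n (f a x) ∧ gg (f a x) i j = gg a i j + d x) →
      Shp n (L.foldl f acc) ∧ gg (L.foldl f acc) i j = gg acc i j + (L.map d).sum := by
  intro L
  induction L with
  | nil => intro acc hs _; exact ⟨hs, by simp⟩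
  | cons x L ih =>
    intro acc hs hstep
    have h1 := hstep acc x (by simp) hs
    have h2 := ih (f acc x) h1.1 (fun a y hy ha => hstep a y (by simp [hy]) ha)
    refine ⟨h2.1, ?_⟩
    simp only [List.foldl_cons, List.map_cons, List.sum_cons]
    rw [h2.2, h1.2]; ring
theorem sum_zero_of_mem {α : Type} (L : List α) (f : α → Int) (h : ∀ x ∈ L, f x = 0) :
    (L.map f).sum = 0 := by
  induction L with
  | nil => simp
  | cons x L ih =>
    simp only [List.map_cons, List.sum_cons]
    rw [h x (by simp), ih (fun y hy => h y (by simp [hy]))]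
    simp

theorem sum1 (n : Nat) (u b : Int) (f : Int → Int) (h1 : 0 ≤ b - u) (h2 : b - u < (n : Int)) :
    ((PySem.List.pyRange 0 n).map (fun q => if q + u = b then f q else 0)).sum = f (b - u) := by
  induction n with
  | zero => omega
  | succ m ih =>
    have hcast : ((m + 1 : Nat) : Int) = (m : Int) + 1 := by push_cast; ring
    rw [hcast, PySem.List.pyRange_one_succ_right (by positivity), List.map_append, List.sum_append]
    by_cases hb : b - u = (m : Int)
    · have hz : ((PySem.List.pyRange 0 m).map (fun q => if q + u = b then f q else 0)).sum = 0 := by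
        apply sum_zero_of_mem
        intro x hx
        rw [PySem.List.mem_pyRange_one] at hx
        have : ¬ x + u = b := by omega
        simp [this]
      rw [hz]
      have : (m : Int) + u = b := by omega
      simp [hb.symm]
    · have hlast : (([(m : Int)]).map (fun q => if q + u = b then f q else 0)).sum = 0 := by
        have : ¬ (m : Int) + u = b := by omega
        simp [this]
      rw [hlast, ih (by omega)]
      simp

theorem sum2 (n : Nat) (u w b c : Int) (g : Int → Int → Int)
    (h1 : 0 ≤ b - u) (h2 : b - u < (n : Int)) (h3 : 0 ≤ c - w) (h4 : c - w < (n : Int)) :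
    ((PySem.List.pyRange 0 n).map (fun p =>
      ((PySem.List.pyRange 0 n).map (fun q => if p + u = b ∧ q + w = c then g p q else 0)).sum)).sum
      = g (b - u) (c - w) := by
  have hinner : ∀ p : Int,
      ((PySem.List.pyRange 0 n).map (fun q => if p + u = b ∧ q + w = c then g p q else 0)).sum
        = if p + u = b then g p (c - w) else 0 := by
    intro p
    by_cases hp : p + u = b
    · rw [if_pos hp]
      have : (fun q => if p + u = b ∧ q + w = c then g p q else 0)
           = (fun q => if q + w = c then g p q else 0) := by
        funext q; by_cases hq : q + w = c <;> simp [hp, hq]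
      rw [this, sum1 n w c (g p) h3 h4]
    · rw [if_neg hp]
      apply sum_zero_of_mem
      intro x hx
      simp [hp]
  have : ((PySem.List.pyRange 0 n).map (fun p =>
        ((PySem.List.pyRange 0 n).map (fun q => if p + u = b ∧ q + w = c then g p q else 0)).sum))
      = ((PySem.List.pyRange 0 n).map (fun p => if p + u = b then g p (c - w) else 0)) := by
    apply List.map_congr_left; intro p _; exact hinner p
  rw [this, sum1 n u b (fun p => g p (c - w)) h1 h2]
def dpq (grid : List (List Int)) (i j p q : Int) : Int :=
  (([-1, 0, 1] : List Int).map (fun dp =>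
    (([-1, 0, 1] : List Int).map (fun dq =>
      if dp ≠ 0 ∨ dq ≠ 0 then
        (if p + dp = i ∧ q + dq = j then gg grid p q else 0)
      else 0)).sum)).sum

theorem step_spec (grid : List (List Int)) (i j p q : Int) (acc : List (List Int))
    (hs : Shp grid.length acc)
    (hi1 : 1 ≤ i) (hin : i ≤ (grid.length : Int) - 2)
    (hj1 : 1 ≤ j) (hjn : j ≤ (grid.length : Int) - 2) :
    Shp grid.length
      (if PySem.List.pyGetD (PySem.List.pyGetD grid p []) q 0 ≠ 0 then
        ([-1, 0, 1] : List Int).foldl (fun acc dp =>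
          ([-1, 0, 1] : List Int).foldl (fun acc dq =>
            if dp ≠ 0 ∨ dq ≠ 0 then
              if 1 ≤ p + dp ∧ p + dp ≤ (grid.length : Int) - 2 ∧ 1 ≤ q + dq ∧ q + dq ≤ (grid.length : Int) - 2 then
                addAt acc (p + dp) (q + dq) (PySem.List.pyGetD (PySem.List.pyGetD grid p []) q 0)
              else acc
            else acc) acc) acc
      else acc) ∧
    gg (if PySem.List.pyGetD (PySem.List.pyGetD grid p []) q 0 ≠ 0 then
        ([-1, 0, 1] : List Int).foldl (fun acc dp =>
          ([-1, 0, 1] : List Int).foldl (fun acc dq =>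
            if dp ≠ 0 ∨ dq ≠ 0 then
              if 1 ≤ p + dp ∧ p + dp ≤ (grid.length : Int) - 2 ∧ 1 ≤ q + dq ∧ q + dq ≤ (grid.length : Int) - 2 then
                addAt acc (p + dp) (q + dq) (PySem.List.pyGetD (PySem.List.pyGetD grid p []) q 0)
              else acc
            else acc) acc) acc
      else acc) i j = gg acc i j + dpq grid i j p q := by
  by_cases hv : PySem.List.pyGetD (PySem.List.pyGetD grid p []) q 0 = 0
  · rw [if_neg (by simpa using hv)]
    refine ⟨hs, ?_⟩
    have hz : dpq grid i j p q = 0 := by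
      simp only [dpq, gg, hv]
      norm_num
    rw [hz, add_zero]
  · rw [if_pos hv]
    exact foldl_gg grid.length i j
      (fun acc dp =>
        ([-1, 0, 1] : List Int).foldl (fun acc dq =>
          if dp ≠ 0 ∨ dq ≠ 0 then
            if 1 ≤ p + dp ∧ p + dp ≤ (grid.length : Int) - 2 ∧ 1 ≤ q + dq ∧ q + dq ≤ (grid.length : Int) - 2 then
              addAt acc (p + dp) (q + dq) (PySem.List.pyGetD (PySem.List.pyGetD grid p []) q 0)
            else acc
          else acc) acc)
      (fun dp => (([-1, 0, 1] : List Int).map (fun dq =>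
        if dp ≠ 0 ∨ dq ≠ 0 then
          (if p + dp = i ∧ q + dq = j then gg grid p q else 0)
        else 0)).sum)
      [-1, 0, 1] acc hs
      (fun a dp _ ha =>
        foldl_gg grid.length i j
          (fun acc dq =>
            if dp ≠ 0 ∨ dq ≠ 0 then
              if 1 ≤ p + dp ∧ p + dp ≤ (grid.length : Int) - 2 ∧ 1 ≤ q + dq ∧ q + dq ≤ (grid.length : Int) - 2 then
                addAt acc (p + dp) (q + dq) (PySem.List.pyGetD (PySem.List.pyGetD grid p []) q 0)
              else acc
            else acc)
          (fun dq =>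
            if dp ≠ 0 ∨ dq ≠ 0 then
              (if p + dp = i ∧ q + dq = j then gg grid p q else 0)
            else 0)
          [-1, 0, 1] a ha
          (fun b dq _ hb => by
            beta_reduce
            by_cases hg : dp ≠ 0 ∨ dq ≠ 0
            · rw [if_pos hg, if_pos hg]
              exact guardAdd_spec grid.length b hb (p + dp) (q + dq)
                (PySem.List.pyGetD (PySem.List.pyGetD grid p []) q 0) i j hi1 hin hj1 hjn
            · rw [if_neg hg, if_neg hg, add_zero]
              exact ⟨hb, rfl⟩))
theorem dpq_expand (grid : List (List Int)) (i j p q : Int) :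
    dpq grid i j p q =
      (if p + -1 = i ∧ q + -1 = j then gg grid p q else 0) +
      (if p + -1 = i ∧ q + 0 = j then gg grid p q else 0) +
      (if p + -1 = i ∧ q + 1 = j then gg grid p q else 0) +
      (if p + 0 = i ∧ q + -1 = j then gg grid p q else 0) +
      (if p + 0 = i ∧ q + 1 = j then gg grid p q else 0) +
      (if p + 1 = i ∧ q + -1 = j then gg grid p q else 0) +
      (if p + 1 = i ∧ q + 0 = j then gg grid p q else 0) +
      (if p + 1 = i ∧ q + 1 = j then gg grid p q else 0) := by
  simp only [dpq, List.map_cons, List.map_nil, List.sum_cons, List.sum_nil]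
  norm_num
  ring
theorem acc_sum (grid : List (List Int)) (i j : Int)
    (hi1 : 1 ≤ i) (hin : i ≤ (grid.length : Int) - 2)
    (hj1 : 1 ≤ j) (hjn : j ≤ (grid.length : Int) - 2) :
    ((PySem.List.pyRange 0 (grid.length : Int)).map (fun p =>
      ((PySem.List.pyRange 0 (grid.length : Int)).map (fun q => dpq grid i j p q)).sum)).sum
    = gg grid (i - -1) (j - -1) + gg grid (i - -1) (j - 0) + gg grid (i - -1) (j - 1) +
      gg grid (i - 0) (j - -1) + gg grid (i - 0) (j - 1) +
      gg grid (i - 1) (j - -1) + gg grid (i - 1) (j - 0) + gg grid (i - 1) (j - 1) := by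
  have hsplit : (fun p => ((PySem.List.pyRange 0 (grid.length : Int)).map (fun q => dpq grid i j p q)).sum)
      = (fun p =>
        ((PySem.List.pyRange 0 (grid.length : Int)).map (fun q => if p + -1 = i ∧ q + -1 = j then gg grid p q else 0)).sum +
        ((PySem.List.pyRange 0 (grid.length : Int)).map (fun q => if p + -1 = i ∧ q + 0 = j then gg grid p q else 0)).sum +
        ((PySem.List.pyRange 0 (grid.length : Int)).map (fun q => if p + -1 = i ∧ q + 1 = j then gg grid p q else 0)).sum +
        ((PySem.List.pyRange 0 (grid.length : Int)).map (fun q => if p + 0 = i ∧ q + -1 = j then gg grid p q else 0)).sum +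
        ((PySem.List.pyRange 0 (grid.length : Int)).map (fun q => if p + 0 = i ∧ q + 1 = j then gg grid p q else 0)).sum +
        ((PySem.List.pyRange 0 (grid.length : Int)).map (fun q => if p + 1 = i ∧ q + -1 = j then gg grid p q else 0)).sum +
        ((PySem.List.pyRange 0 (grid.length : Int)).map (fun q => if p + 1 = i ∧ q + 0 = j then gg grid p q else 0)).sum +
        ((PySem.List.pyRange 0 (grid.length : Int)).map (fun q => if p + 1 = i ∧ q + 1 = j then gg grid p q else 0)).sum) := by
    funext p
    calc ((PySem.List.pyRange 0 (grid.length : Int)).map (fun q => dpq grid i j p q)).sum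
        = ((PySem.List.pyRange 0 (grid.length : Int)).map (fun q =>
            (if p + -1 = i ∧ q + -1 = j then gg grid p q else 0) +
            (if p + -1 = i ∧ q + 0 = j then gg grid p q else 0) +
            (if p + -1 = i ∧ q + 1 = j then gg grid p q else 0) +
            (if p + 0 = i ∧ q + -1 = j then gg grid p q else 0) +
            (if p + 0 = i ∧ q + 1 = j then gg grid p q else 0) +
            (if p + 1 = i ∧ q + -1 = j then gg grid p q else 0) +
            (if p + 1 = i ∧ q + 0 = j then gg grid p q else 0) +
            (if p + 1 = i ∧ q + 1 = j then gg grid p q else 0))).sum := by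
          apply congrArg
          apply List.map_congr_left
          intro q _
          exact dpq_expand grid i j p q
      _ = _ := by
          rw [PySem.List.sum_map_add_int, PySem.List.sum_map_add_int, PySem.List.sum_map_add_int,
              PySem.List.sum_map_add_int, PySem.List.sum_map_add_int, PySem.List.sum_map_add_int,
              PySem.List.sum_map_add_int]
  rw [hsplit]
  rw [PySem.List.sum_map_add_int, PySem.List.sum_map_add_int, PySem.List.sum_map_add_int,
      PySem.List.sum_map_add_int, PySem.List.sum_map_add_int, PySem.List.sum_map_add_int,
      PySem.List.sum_map_add_int]
  rw [sum2 grid.length (-1) (-1) i j (gg grid) (by omega) (by omega) (by omega) (by omega),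
      sum2 grid.length (-1) 0 i j (gg grid) (by omega) (by omega) (by omega) (by omega),
      sum2 grid.length (-1) 1 i j (gg grid) (by omega) (by omega) (by omega) (by omega),
      sum2 grid.length 0 (-1) i j (gg grid) (by omega) (by omega) (by omega) (by omega),
      sum2 grid.length 0 1 i j (gg grid) (by omega) (by omega) (by omega) (by omega),
      sum2 grid.length 1 (-1) i j (gg grid) (by omega) (by omega) (by omega) (by omega),
      sum2 grid.length 1 0 i j (gg grid) (by omega) (by omega) (by omega) (by omega),
      sum2 grid.length 1 1 i j (gg grid) (by omega) (by omega) (by omega) (by omega)]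
def accOf (grid : List (List Int)) : List (List Int) :=
  (PySem.List.pyRange 0 (grid.length : Int)).foldl (fun acc p =>
    (PySem.List.pyRange 0 (grid.length : Int)).foldl (fun acc q =>
      let v := PySem.List.pyGetD (PySem.List.pyGetD grid p []) q 0
      if v ≠ 0 then
        ([-1, 0, 1] : List Int).foldl (fun acc dp =>
          ([-1, 0, 1] : List Int).foldl (fun acc dq =>
            if dp ≠ 0 ∨ dq ≠ 0 then
              if 1 ≤ p + dp ∧ p + dp ≤ (grid.length : Int) - 2 ∧ 1 ≤ q + dq ∧ q + dq ≤ (grid.length : Int) - 2 then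
                addAt acc (p + dp) (q + dq) v
              else acc
            else acc) acc) acc
      else acc) acc)
    (List.replicate grid.length (List.replicate grid.length (0 : Int)))

theorem accOf_val (grid : List (List Int)) (i j : Int)
    (hi1 : 1 ≤ i) (hin : i ≤ (grid.length : Int) - 2)
    (hj1 : 1 ≤ j) (hjn : j ≤ (grid.length : Int) - 2) :
    gg (accOf grid) i j
      = gg grid (i - -1) (j - -1) + gg grid (i - -1) (j - 0) + gg grid (i - -1) (j - 1) +
        gg grid (i - 0) (j - -1) + gg grid (i - 0) (j - 1) +
        gg grid (i - 1) (j - -1) + gg grid (i - 1) (j - 0) + gg grid (i - 1) (j - 1) := by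
  have h0 : Shp grid.length (List.replicate grid.length (List.replicate grid.length (0 : Int))) := by
    constructor
    · simp
    · intro r hr
      rw [List.eq_of_mem_replicate hr]
      simp
  have H := foldl_gg grid.length i j
    (fun acc p =>
      (PySem.List.pyRange 0 (grid.length : Int)).foldl (fun acc q =>
        let v := PySem.List.pyGetD (PySem.List.pyGetD grid p []) q 0
        if v ≠ 0 then
          ([-1, 0, 1] : List Int).foldl (fun acc dp =>
            ([-1, 0, 1] : List Int).foldl (fun acc dq =>
              if dp ≠ 0 ∨ dq ≠ 0 then
                if 1 ≤ p + dp ∧ p + dp ≤ (grid.length : Int) - 2 ∧ 1 ≤ q + dq ∧ q + dq ≤ (grid.length : Int) - 2 then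
                  addAt acc (p + dp) (q + dq) v
                else acc
              else acc) acc) acc
        else acc) acc)
    (fun p => ((PySem.List.pyRange 0 (grid.length : Int)).map (fun q => dpq grid i j p q)).sum)
    (PySem.List.pyRange 0 (grid.length : Int))
    (List.replicate grid.length (List.replicate grid.length (0 : Int))) h0
    (fun a p _ ha =>
      foldl_gg grid.length i j
        (fun acc q =>
          let v := PySem.List.pyGetD (PySem.List.pyGetD grid p []) q 0
          if v ≠ 0 then
            ([-1, 0, 1] : List Int).foldl (fun acc dp =>
              ([-1, 0, 1] : List Int).foldl (fun acc dq =>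
                if dp ≠ 0 ∨ dq ≠ 0 then
                  if 1 ≤ p + dp ∧ p + dp ≤ (grid.length : Int) - 2 ∧ 1 ≤ q + dq ∧ q + dq ≤ (grid.length : Int) - 2 then
                    addAt acc (p + dp) (q + dq) v
                  else acc
                else acc) acc) acc
          else acc)
        (fun q => dpq grid i j p q)
        (PySem.List.pyRange 0 (grid.length : Int)) a ha
        (fun b q _ hb => step_spec grid i j p q b hb hi1 hin hj1 hjn))
  have hz : gg (List.replicate grid.length (List.replicate grid.length (0 : Int))) i j = 0 := by
    unfold gg
    rw [PySem.List.pyGetD_eq_getElem _ [] (by omega) (by simp; omega)]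
    rw [List.getElem_replicate]
    rw [PySem.List.pyGetD_eq_getElem _ 0 (by omega) (by simp; omega)]
    simp
  have := H.2
  rw [hz, zero_add] at this
  unfold accOf
  rw [this]
  exact acc_sum grid i j hi1 hin hj1 hjn
theorem seeds_eq (grid next_grid : List (List Int)) :
    seeds grid next_grid = seeds_alt grid next_grid := by
  by_cases h3 : (grid.length : Int) < 3
  · have hnil : PySem.List.pyRange 1 ((grid.length : Int) - 1) = [] :=
      PySem.List.pyRange_one_eq_nil (by omega)
    unfold seeds seeds_alt
    rw [hnil]
    simp [h3]
  · have halt : seeds_alt grid next_grid =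
        (PySem.List.pyRange 1 ((grid.length : Int) - 1)).foldl (fun ng i =>
          (PySem.List.pyRange 1 ((grid.length : Int) - 1)).foldl (fun ng j =>
            if PySem.List.pyGetD (PySem.List.pyGetD grid i []) j 0 = 0 ∧
               PySem.List.pyGetD (PySem.List.pyGetD (accOf grid) i []) j 0 = 2 then
              setCell ng i j 1
            else ng) ng) next_grid := by
      simp only [seeds_alt]
      rw [if_neg h3]
      rfl
    rw [halt]
    unfold seeds
    apply PySem.List.foldl_congr_mem
    intro ngi i hi
    apply PySem.List.foldl_congr_mem
    intro ngj j hj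
    rw [PySem.List.mem_pyRange_one] at hi hj
    have hsum : PySem.List.pyGetD (PySem.List.pyGetD (accOf grid) i []) j 0 =
        ([PySem.List.pyGetD (PySem.List.pyGetD grid (i - 1) []) j 0,
          PySem.List.pyGetD (PySem.List.pyGetD grid (i + 1) []) j 0,
          PySem.List.pyGetD (PySem.List.pyGetD grid i []) (j - 1) 0,
          PySem.List.pyGetD (PySem.List.pyGetD grid i []) (j + 1) 0,
          PySem.List.pyGetD (PySem.List.pyGetD grid (i - 1) []) (j + 1) 0,
          PySem.List.pyGetD (PySem.List.pyGetD grid (i - 1) []) (j - 1) 0,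
          PySem.List.pyGetD (PySem.List.pyGetD grid (i + 1) []) (j + 1) 0,
          PySem.List.pyGetD (PySem.List.pyGetD grid (i + 1) []) (j - 1) 0] : List Int).sum := by
      have hv := accOf_val grid i j (by omega) (by omega) (by omega) (by omega)
      have e1 : i - -1 = i + 1 := by ring
      have e2 : j - -1 = j + 1 := by ring
      have e3 : i - 0 = i := by ring
      have e4 : j - 0 = j := by ring
      rw [e1, e2, e3, e4] at hv
      simp only [List.sum_cons, List.sum_nil, add_zero]
      unfold gg at hv
      rw [hv]
      ring
    by_cases hc0 : PySem.List.pyGetD (PySem.List.pyGetD grid i []) j 0 = 0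
    · rw [if_pos hc0]
      dsimp only
      by_cases hs2 : ([PySem.List.pyGetD (PySem.List.pyGetD grid (i - 1) []) j 0,
          PySem.List.pyGetD (PySem.List.pyGetD grid (i + 1) []) j 0,
          PySem.List.pyGetD (PySem.List.pyGetD grid i []) (j - 1) 0,
          PySem.List.pyGetD (PySem.List.pyGetD grid i []) (j + 1) 0,
          PySem.List.pyGetD (PySem.List.pyGetD grid (i - 1) []) (j + 1) 0,
          PySem.List.pyGetD (PySem.List.pyGetD grid (i - 1) []) (j - 1) 0,
          PySem.List.pyGetD (PySem.List.pyGetD grid (i + 1) []) (j + 1) 0,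
          PySem.List.pyGetD (PySem.List.pyGetD grid (i + 1) []) (j - 1) 0] : List Int).sum = 2
      · rw [if_pos hs2, if_pos ⟨hc0, by rw [hsum]; exact hs2⟩]
      · rw [if_neg hs2, if_neg (fun h => hs2 (by rw [← hsum]; exact h.2))]
    · rw [if_neg hc0, if_neg (fun h => hc0 h.1)]

-- ===== VERDICT (by name: the statement is the Claim_ definition above) =====
theorem seeds_spec : Claim_equal_seeds := by
  intro grid next_grid _ _
  unfold Spec_seeds
  exact seeds_eq grid next_grid
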